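-- pv_equiv track=rewrite | github.com/Aditya29027003/LHC-Sales-analytics- | tracker.py | assign_sub_team
-- ===== SOURCE A (Python) =====
-- SUB_TEAM_MAP: dict[str, dict[str, list[str]]] = {
--     "WSH (LB)": {
--         "Dermatology": [
--             "Vishnu T.V", "Sathish Kumar", "Abel Forbes", "Kit Aranas",
--         ],
--         "Life Sciences": [
--             "Piyush Yadav", "Ramadan Youssef", "Mohammed Kamal",
--             "Gopinath Sarangapani", "Ayyaz Khan",
--         ],
--         "Medical Division": [
--             "Aldrich Gaupo Torres", "Shameem Arakkal Hydros",
--             "Awaad Othmaan", "Mohammed Thwaha",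
--         ],
--     },
--     # Add other divisions here later, e.g.:
--     # "MedDivision (L9)": { "Team A": [...], "Team B": [...] },
-- }
--
-- def assign_sub_team(division: str, employee: str) -> str:
--     """Return the sub-team name for (division, employee).
--
--     Returns "-" when the division has no sub-team configuration, or
--     "Other / Unassigned" when the employee isn't listed in any sub-team
--     of a mapped division.
--     """
--     mapping = SUB_TEAM_MAP.get(str(division))
--     if not mapping:
--         return "-"
--     for team, members in mapping.items():
--         if str(employee) in members:
--             return team
--     return "Other / Unassigned"
-- ===== SOURCE B (Python) =====
-- SUB_TEAM_MAP: dict[str, dict[str, list[str]]] = {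
--     "WSH (LB)": {
--         "Dermatology": [
--             "Vishnu T.V", "Sathish Kumar", "Abel Forbes", "Kit Aranas",
--         ],
--         "Life Sciences": [
--             "Piyush Yadav", "Ramadan Youssef", "Mohammed Kamal",
--             "Gopinath Sarangapani", "Ayyaz Khan",
--         ],
--         "Medical Division": [
--             "Aldrich Gaupo Torres", "Shameem Arakkal Hydros",
--             "Awaad Othmaan", "Mohammed Thwaha",
--         ],
--     },
-- }
--
-- # Precomputed once at import time: divisions that actually have sub-teams,
-- # and a flat (division, employee) -> team reverse index (first match wins).
-- _MAPPED_DIVISIONS = {d for d, teams in SUB_TEAM_MAP.items() if teams}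
-- _TEAM_INDEX: dict[tuple[str, str], str] = {}
-- for _div, _teams in SUB_TEAM_MAP.items():
--     for _team, _members in _teams.items():
--         for _m in _members:
--             _TEAM_INDEX.setdefault((_div, _m), _team)
--
--
-- def assign_sub_team(division: str, employee: str) -> str:
--     if str(division) not in _MAPPED_DIVISIONS:
--         return "-"
--     return _TEAM_INDEX.get((str(division), str(employee)), "Other / Unassigned")
-- ===== Notes on version B (the rewrite author's own statement) =====
-- stated objective: simpler
-- what changed: A scans each team's member list on every call; B precomputes at module level a set of mapped divisions and a flat (division, employee) -> team reverse index (setdefault: first matching team wins), making the function body two loop-free lookups.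
import Mathlib
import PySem

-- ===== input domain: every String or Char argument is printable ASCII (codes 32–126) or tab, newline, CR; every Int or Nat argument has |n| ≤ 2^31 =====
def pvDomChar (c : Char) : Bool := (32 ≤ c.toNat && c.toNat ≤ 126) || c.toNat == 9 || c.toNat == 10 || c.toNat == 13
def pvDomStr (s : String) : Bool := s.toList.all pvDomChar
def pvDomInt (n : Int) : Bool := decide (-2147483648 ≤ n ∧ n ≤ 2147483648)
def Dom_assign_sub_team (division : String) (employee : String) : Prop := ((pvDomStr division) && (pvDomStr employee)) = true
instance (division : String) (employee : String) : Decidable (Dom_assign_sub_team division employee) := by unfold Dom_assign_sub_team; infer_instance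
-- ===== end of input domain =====

-- B replaces A's per-call scan over each team's member list with a module-level
-- precomputed reverse index (division, employee) -> team, so the function body is loop-free (objective: simpler).

-- ===== PORT A =====
def SUB_TEAM_MAP : PySem.Dict String (PySem.Dict String (List String)) :=
  PySem.Dict.mk
    [("WSH (LB)", PySem.Dict.mk
       [("Dermatology",
          ["Vishnu T.V", "Sathish Kumar", "Abel Forbes", "Kit Aranas"]),
        ("Life Sciences",
          ["Piyush Yadav", "Ramadan Youssef", "Mohammed Kamal",
           "Gopinath Sarangapani", "Ayyaz Khan"]),
        ("Medical Division",
          ["Aldrich Gaupo Torres", "Shameem Arakkal Hydros",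
           "Awaad Othmaan", "Mohammed Thwaha"])])]

-- A's 'for team, members in mapping.items()' loop with early return
def astFindTeam (items : List (String × List String)) (employee : String) : String :=
  match items with
  | [] => "Other / Unassigned"
  | (team, members) :: rest =>
    if members.contains employee then team else astFindTeam rest employee

def assign_sub_team (division : String) (employee : String) : String :=
  match SUB_TEAM_MAP.get? division with
  | none => "-"
  | some mapping =>
    if mapping.size = 0 then "-"   -- 'if not mapping'
    else astFindTeam mapping.items employee

-- ===== PORT B =====
-- _MAPPED_DIVISIONS = {d for d, teams in SUB_TEAM_MAP.items() if teams}
def MAPPED_DIVISIONS : PySem.Set String :=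
  PySem.Set.ofList ((SUB_TEAM_MAP.items.filter (fun p => p.2.size ≠ 0)).map (·.1))

-- the nested index-building loops (setdefault: first matching team wins)
def TEAM_INDEX : PySem.Dict (String × String) String :=
  SUB_TEAM_MAP.items.foldl (fun acc p =>
    p.2.items.foldl (fun acc q =>
      q.2.foldl (fun acc m => acc.setdefault (p.1, m) q.1) acc) acc)
    PySem.Dict.empty

def assign_sub_team_alt (division : String) (employee : String) : String :=
  if MAPPED_DIVISIONS.contains division = false then "-"
  else TEAM_INDEX.getD (division, employee) "Other / Unassigned"

-- ===== PRECONDITION & SPEC =====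
def Spec_assign_sub_team (division : String) (employee : String) (out : String) : Prop := out = assign_sub_team_alt division employee
instance (division : String) (employee : String) (out : String) : Decidable (Spec_assign_sub_team division employee out) := by unfold Spec_assign_sub_team; infer_instance

-- ===== CLAIM (what is proved, stated in full; the proofs are below) =====
def Claim_equal_assign_sub_team : Prop := ∀ (division : String) (employee : String), Dom_assign_sub_team division employee → Spec_assign_sub_team division employee (assign_sub_team division employee)

-- ===== LEMMAS AND PROOFS =====

-- the precomputed loops evaluate to their literal results (kernel evaluation)
theorem mapped_divisions_eval : MAPPED_DIVISIONS = ["WSH (LB)"] := rfl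

-- the core of the equivalence on the one mapped division: A's team-by-team scan
-- equals B's flat-index lookup, by cases on the 13 configured employees
set_option maxHeartbeats 1000000 in
set_option maxRecDepth 4096 in
theorem scan_eq_index (e : String) : astFindTeam
    [("Dermatology", ["Vishnu T.V", "Sathish Kumar", "Abel Forbes", "Kit Aranas"]),
     ("Life Sciences", ["Piyush Yadav", "Ramadan Youssef", "Mohammed Kamal",
        "Gopinath Sarangapani", "Ayyaz Khan"]),
     ("Medical Division", ["Aldrich Gaupo Torres", "Shameem Arakkal Hydros",
        "Awaad Othmaan", "Mohammed Thwaha"])] e =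
    PySem.Dict.getD (PySem.Dict.mk
    [(("WSH (LB)", "Vishnu T.V"), "Dermatology"),
     (("WSH (LB)", "Sathish Kumar"), "Dermatology"),
     (("WSH (LB)", "Abel Forbes"), "Dermatology"),
     (("WSH (LB)", "Kit Aranas"), "Dermatology"),
     (("WSH (LB)", "Piyush Yadav"), "Life Sciences"),
     (("WSH (LB)", "Ramadan Youssef"), "Life Sciences"),
     (("WSH (LB)", "Mohammed Kamal"), "Life Sciences"),
     (("WSH (LB)", "Gopinath Sarangapani"), "Life Sciences"),
     (("WSH (LB)", "Ayyaz Khan"), "Life Sciences"),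
     (("WSH (LB)", "Aldrich Gaupo Torres"), "Medical Division"),
     (("WSH (LB)", "Shameem Arakkal Hydros"), "Medical Division"),
     (("WSH (LB)", "Awaad Othmaan"), "Medical Division"),
     (("WSH (LB)", "Mohammed Thwaha"), "Medical Division")]) ("WSH (LB)", e) "Other / Unassigned" := by
  simp only [astFindTeam, List.contains, PySem.Dict.getD_eq_get?_getD, PySem.Dict.get?_mk_cons,
    Prod.mk.injEq, beq_iff_eq, List.elem_eq_mem, List.mem_cons,
    decide_eq_true_eq, List.not_mem_nil, or_false, true_and]
  by_cases h1 : e = "Vishnu T.V"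
  · simp [h1]
  by_cases h2 : e = "Sathish Kumar"
  · simp [h2]
  by_cases h3 : e = "Abel Forbes"
  · simp [h3]
  by_cases h4 : e = "Kit Aranas"
  · simp [h4]
  by_cases h5 : e = "Piyush Yadav"
  · simp [h5]
  by_cases h6 : e = "Ramadan Youssef"
  · simp [h6]
  by_cases h7 : e = "Mohammed Kamal"
  · simp [h7]
  by_cases h8 : e = "Gopinath Sarangapani"
  · simp [h8]
  by_cases h9 : e = "Ayyaz Khan"
  · simp [h9]
  by_cases h10 : e = "Aldrich Gaupo Torres"
  · simp [h10]
  by_cases h11 : e = "Shameem Arakkal Hydros"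
  · simp [h11]
  by_cases h12 : e = "Awaad Othmaan"
  · simp [h12]
  by_cases h13 : e = "Mohammed Thwaha"
  · simp [h13]
  simp [h1, h2, h3, h4, h5, h6, h7, h8, h9, h10, h11, h12, h13, eq_comm, PySem.Dict.get?]

theorem assign_sub_team_eq_alt (division employee : String) :
    assign_sub_team division employee = assign_sub_team_alt division employee := by
  by_cases hd : division = "WSH (LB)"
  · subst hd
    have hA : assign_sub_team "WSH (LB)" employee = astFindTeam
      [("Dermatology", ["Vishnu T.V", "Sathish Kumar", "Abel Forbes", "Kit Aranas"]),
       ("Life Sciences", ["Piyush Yadav", "Ramadan Youssef", "Mohammed Kamal",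
          "Gopinath Sarangapani", "Ayyaz Khan"]),
       ("Medical Division", ["Aldrich Gaupo Torres", "Shameem Arakkal Hydros",
          "Awaad Othmaan", "Mohammed Thwaha"])] employee := rfl
    have hB : assign_sub_team_alt "WSH (LB)" employee = PySem.Dict.getD (PySem.Dict.mk
      [(("WSH (LB)", "Vishnu T.V"), "Dermatology"),
       (("WSH (LB)", "Sathish Kumar"), "Dermatology"),
       (("WSH (LB)", "Abel Forbes"), "Dermatology"),
       (("WSH (LB)", "Kit Aranas"), "Dermatology"),
       (("WSH (LB)", "Piyush Yadav"), "Life Sciences"),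
       (("WSH (LB)", "Ramadan Youssef"), "Life Sciences"),
       (("WSH (LB)", "Mohammed Kamal"), "Life Sciences"),
       (("WSH (LB)", "Gopinath Sarangapani"), "Life Sciences"),
       (("WSH (LB)", "Ayyaz Khan"), "Life Sciences"),
       (("WSH (LB)", "Aldrich Gaupo Torres"), "Medical Division"),
       (("WSH (LB)", "Shameem Arakkal Hydros"), "Medical Division"),
       (("WSH (LB)", "Awaad Othmaan"), "Medical Division"),
       (("WSH (LB)", "Mohammed Thwaha"), "Medical Division")])
      ("WSH (LB)", employee) "Other / Unassigned" := rfl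
    rw [hA, hB]
    exact scan_eq_index employee
  · have hA : assign_sub_team division employee = "-" := by
      simp [assign_sub_team, SUB_TEAM_MAP, PySem.Dict.get?, Ne.symm hd]
    have hB : assign_sub_team_alt division employee = "-" := by
      rw [assign_sub_team_alt, mapped_divisions_eval]
      simp only [PySem.Set.contains, List.contains_eq_mem, List.mem_cons, hd,
        List.not_mem_nil, or_self, decide_false, if_pos]
    rw [hA, hB]

-- ===== VERDICT (by name: the statement is the Claim_ definition above) =====
theorem assign_sub_team_spec : Claim_equal_assign_sub_team := by
  intro division employee _
  unfold Spec_assign_sub_team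
  exact assign_sub_team_eq_alt division employee
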